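-- pv_equiv track=rewrite | github.com/quiltdata/quilt-mcp-server | src/quilt_mcp/backends/quilt3_backend_packages.py | _escape_elasticsearch_query
-- ===== SOURCE A (Python) =====
-- def _escape_elasticsearch_query(query: str) -> str:
--     """Escape special characters in Elasticsearch query_string queries.
--
--     Elasticsearch query_string syntax treats certain characters as operators.
--     This function escapes them to allow literal searches while preserving wildcards.
--
--     Args:
--         query: Raw query string
--
--     Returns:
--         Escaped query string safe for query_string queries (preserving wildcards)
--     """
--     # Characters that need to be escaped in Elasticsearch query_string
--     # Order matters: escape backslash first to avoid double-escaping
--     # NOTE: * and ? are INTENTIONALLY OMITTED to preserve wildcard functionality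
--     special_chars = [
--         '\\',
--         '+',
--         '-',
--         '=',
--         '>',
--         '<',
--         '!',
--         '(',
--         ')',
--         '{',
--         '}',
--         '[',
--         ']',
--         '^',
--         '"',
--         '~',
--         ':',
--         '/',
--     ]
--
--     # Escape each special character with a backslash
--     escaped = query
--     for char in special_chars:
--         escaped = escaped.replace(char, '\\' + char)
--
--     return escaped
-- ===== SOURCE B (Python) =====
-- _SPECIAL = frozenset('\\+-=><!(){}[]^"~:/')
--
--
-- def _escape_elasticsearch_query(query: str) -> str:
--     """Single pass: emit '\' before each special character (wildcards * ? kept)."""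
--     return ''.join('\\' + c if c in _SPECIAL else c for c in query)
-- ===== Notes on version B (the rewrite author's own statement) =====
-- stated objective: simpler
-- what changed: Replaces 18 sequential full-string .replace passes with one character-level scan that joins '\'+c for the 18 special characters (backslash handled uniformly by the single forward pass).
import Mathlib
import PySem

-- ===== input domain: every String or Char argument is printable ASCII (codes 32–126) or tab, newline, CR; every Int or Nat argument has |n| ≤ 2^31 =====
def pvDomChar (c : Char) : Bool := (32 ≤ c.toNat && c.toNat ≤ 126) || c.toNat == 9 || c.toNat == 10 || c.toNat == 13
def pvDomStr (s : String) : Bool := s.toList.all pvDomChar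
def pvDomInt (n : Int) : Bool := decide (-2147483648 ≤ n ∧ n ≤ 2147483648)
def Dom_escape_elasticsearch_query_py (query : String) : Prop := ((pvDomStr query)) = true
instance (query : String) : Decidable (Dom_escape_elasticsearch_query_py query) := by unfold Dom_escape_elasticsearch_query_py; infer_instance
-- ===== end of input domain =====

-- B replaces A's 18 sequential full-string .replace passes with one character-level
-- scan over the query (objective: simpler / single pass); same return value.

-- ===== PORT A =====
-- A: 18 repeated .replace passes, backslash first.
def escape_elasticsearch_query_py (query : String) : String :=
  let special_chars : List String :=
    ["\\", "+", "-", "=", ">", "<", "!", "(", ")", "{", "}", "[", "]", "^", "\"", "~", ":", "/"]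
  special_chars.foldl (fun escaped char => PySem.Str.replace escaped char ("\\" ++ char)) query

-- ===== PORT B =====
-- B: the frozenset of the 18 special characters (wildcards * ? omitted), built once.
def pvSpecialSet : PySem.Set Char :=
  PySem.Set.ofList ['\\','+','-','=','>','<','!','(',')','{','}','[',']','^','"','~',':','/']

-- B: one character's contribution to the output ('\' + c for specials, c otherwise).
def pvEscChar (c : Char) : List Char := if c ∈ pvSpecialSet then '\\' :: [c] else [c]

-- B: single pass over the query, joining the pieces.
def escape_elasticsearch_query_py_alt (query : String) : String :=
  String.ofList (query.toList.flatMap pvEscChar)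

-- ===== PRECONDITION & SPEC =====
def Spec_escape_elasticsearch_query_py (query : String) (out : String) : Prop := out = escape_elasticsearch_query_py_alt query
instance (query : String) (out : String) : Decidable (Spec_escape_elasticsearch_query_py query out) := by unfold Spec_escape_elasticsearch_query_py; infer_instance

-- ===== CLAIM (what is proved, stated in full; the proofs are below) =====
def Claim_equal_escape_elasticsearch_query_py : Prop := ∀ (query : String), Dom_escape_elasticsearch_query_py query → Spec_escape_elasticsearch_query_py query (escape_elasticsearch_query_py query)

-- ===== LEMMAS AND PROOFS =====

-- A's whole chain of replaces, on the List Char side.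
def chainA (s : List Char) : List Char :=
  (['\\','+','-','=','>','<','!','(',')','{','}','[',']','^','"','~',':','/'].foldl
    (fun e a => PySem.Chars.replace e [a] ['\\', a]) s)

-- replace.go with a single-character pattern, characterised with enough fuel.
lemma go_single (a : Char) (new : List Char) :
    ∀ fuel (l acc : List Char), l.length ≤ fuel →
      PySem.Chars.replace.go [a] new fuel l acc
        = acc.reverse ++ l.flatMap (fun c => if c = a then new else [c]) := by
  intro fuel
  induction fuel with
  | zero => intro l acc h; rw [PySem.Chars.replace.go.eq_def]
            cases l with
            | nil => simp
            | cons c t => simp at h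
  | succ n ih =>
    intro l acc h
    cases l with
    | nil => rw [PySem.Chars.replace.go.eq_def]; simp
    | cons c t =>
      rw [PySem.Chars.replace.go.eq_def]
      by_cases hc : c = a
      · subst hc
        simp [List.isPrefixOf, ih t _ (by simpa using h)]
      · simp [List.isPrefixOf, Ne.symm hc, hc, ih t _ (by simpa using h)]

-- Python's s.replace(a, new) for a one-character pattern is a per-character flatMap.
lemma replace_single (s : List Char) (a : Char) (new : List Char) :
    PySem.Chars.replace s [a] new = s.flatMap (fun c => if c = a then new else [c]) := by
  rw [PySem.Chars.replace]
  simp [go_single a new s.length s [] le_rfl]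

-- The chain of 18 single-character replaces acts independently on each input character.
lemma chain_flat (s : List Char) : chainA s = s.flatMap (fun c => chainA [c]) := by
  simp [chainA, List.foldl, replace_single, List.flatMap_assoc]

-- On a single character the chain produces exactly B's per-character piece.
lemma per_char (c : Char) : chainA [c] = pvEscChar c := by
  by_cases h : c ∈ (['\\','+','-','=','>','<','!','(',')','{','}','[',']','^','"','~',':','/'] : List Char)
  · simp only [List.mem_cons, List.not_mem_nil, or_false] at h
    rcases h with h|h|h|h|h|h|h|h|h|h|h|h|h|h|h|h|h|h <;> subst h <;> decide
  · have h' : c ∉ pvSpecialSet := by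
      simpa [pvSpecialSet, PySem.Set.mem_ofList] using h
    simp only [List.mem_cons, List.not_mem_nil, or_false, not_or] at h
    obtain ⟨h1,h2,h3,h4,h5,h6,h7,h8,h9,h10,h11,h12,h13,h14,h15,h16,h17,h18⟩ := h
    simp [chainA, List.foldl, replace_single, pvEscChar, h',
      h1,h2,h3,h4,h5,h6,h7,h8,h9,h10,h11,h12,h13,h14,h15,h16,h17,h18]

-- A's port, moved to the List Char side, is chainA.
lemma portA_toList (q : String) : (escape_elasticsearch_query_py q).toList = chainA q.toList := by
  simp only [escape_elasticsearch_query_py, chainA, List.foldl]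
  simp only [PySem.Str.toList_replace]
  rfl

-- ===== VERDICT (by name: the statement is the Claim_ definition above) =====
theorem escape_elasticsearch_query_py_spec : Claim_equal_escape_elasticsearch_query_py := by
  intro query _
  unfold Spec_escape_elasticsearch_query_py
  apply String.toList_injective
  rw [portA_toList, chain_flat]
  simp [escape_elasticsearch_query_py_alt, per_char]
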